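-- pv_equiv track=rewrite | github.com/paiml/depyler | examples/hard_job_sequence.py | count_scheduled_jobs
-- ===== SOURCE A (Python) =====
-- def sort_jobs_by_profit_desc(profits: list[int], deadlines: list[int]) -> list[int]:
--     """Return indices sorted by profit descending."""
--     length: int = len(profits)
--     indices: list[int] = []
--     idx: int = 0
--     while idx < length:
--         indices.append(idx)
--         idx = idx + 1
--     i: int = 0
--     while i < length:
--         j: int = i + 1
--         while j < length:
--             if profits[indices[j]] > profits[indices[i]]:
--                 temp: int = indices[i]
--                 indices[i] = indices[j]
--                 indices[j] = temp
--             j = j + 1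
--         i = i + 1
--     return indices
--
-- def count_scheduled_jobs(profits: list[int], deadlines: list[int]) -> int:
--     """Count how many jobs can be scheduled."""
--     length: int = len(profits)
--     if length == 0:
--         return 0
--     max_deadline: int = 0
--     idx: int = 0
--     while idx < length:
--         if deadlines[idx] > max_deadline:
--             max_deadline = deadlines[idx]
--         idx = idx + 1
--     slots: list[int] = []
--     si: int = 0
--     while si < max_deadline:
--         slots.append(-1)
--         si = si + 1
--     order: list[int] = sort_jobs_by_profit_desc(profits, deadlines)
--     count: int = 0
--     oi: int = 0
--     while oi < length:
--         job_idx: int = order[oi]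
--         slot: int = deadlines[job_idx] - 1
--         while slot >= 0:
--             if slots[slot] == -1:
--                 slots[slot] = job_idx
--                 count = count + 1
--                 slot = -1
--             else:
--                 slot = slot - 1
--         oi = oi + 1
--     return count
-- ===== SOURCE B (Python) =====
-- def count_scheduled_jobs(profits: list[int], deadlines: list[int]) -> int:
--     """Count how many jobs can be scheduled (EDF greedy: the count is
--     independent of profits, only the multiset of deadlines matters)."""
--     count = 0
--     for d in sorted(deadlines[:len(profits)]):
--         if count < d:
--             count += 1
--     return count
-- ===== Notes on version B (the rewrite author's own statement) =====
-- stated objective: faster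
-- what changed: Replaces the O(n^2) selection sort of indices by profit plus latest-free-slot filling of a max(deadline)-sized slot array by a single EDF pass (schedule iff count < d) over the sorted first len(profits) deadlines; the scheduled count is provably independent of the profit order.
import Mathlib
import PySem

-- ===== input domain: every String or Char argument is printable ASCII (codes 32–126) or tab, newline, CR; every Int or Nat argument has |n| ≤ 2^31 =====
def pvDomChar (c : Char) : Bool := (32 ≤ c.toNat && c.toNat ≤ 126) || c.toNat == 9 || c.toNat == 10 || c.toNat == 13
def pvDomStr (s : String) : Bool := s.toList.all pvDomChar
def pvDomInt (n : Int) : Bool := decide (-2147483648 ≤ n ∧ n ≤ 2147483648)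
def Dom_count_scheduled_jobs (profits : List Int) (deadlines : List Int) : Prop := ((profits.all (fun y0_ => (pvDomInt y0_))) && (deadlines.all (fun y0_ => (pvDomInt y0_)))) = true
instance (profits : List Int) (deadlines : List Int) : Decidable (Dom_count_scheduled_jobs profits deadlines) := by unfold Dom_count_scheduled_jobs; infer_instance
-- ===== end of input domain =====

-- B replaces A's profit-sorted latest-free-slot filling of a max(deadline)-sized slot array by a
-- single EDF pass over the sorted deadlines; the proved claim is about the RETURN value.

-- ===== PORT A =====
-- helper of A: selection sort of the index list by profit, descending (literal transliteration)
def sort_jobs_by_profit_desc (profits : List Int) (deadlines : List Int) : List Int :=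
  let length : Int := profits.length
  let indices : List Int := (PySem.List.pyRange 0 length 1).foldl (fun ind idx => ind ++ [idx]) []
  (PySem.List.pyRange 0 length 1).foldl (fun ind i =>
    (PySem.List.pyRange (i + 1) length 1).foldl (fun ind j =>
      if PySem.List.pyGetD profits (PySem.List.pyGetD ind j 0) 0 >
         PySem.List.pyGetD profits (PySem.List.pyGetD ind i 0) 0 then
        let temp : Int := PySem.List.pyGetD ind i 0
        PySem.List.pySetD (PySem.List.pySetD ind i (PySem.List.pyGetD ind j 0)) j temp
      else ind) ind) indices

-- A's inner `while slot >= 0` loop (the `slot = -1` assignment after a fill is the early exit)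
def pvFillSlot (job_idx : Int) (slot : Int) (slots : List Int) (count : Int) : List Int × Int :=
  if h : 0 ≤ slot then
    if PySem.List.pyGetD slots slot 0 == -1 then
      (PySem.List.pySetD slots slot job_idx, count + 1)
    else pvFillSlot job_idx (slot - 1) slots count
  else (slots, count)
termination_by (slot + 1).toNat
decreasing_by omega

def count_scheduled_jobs (profits : List Int) (deadlines : List Int) : Int :=
  let length : Int := profits.length
  if length == 0 then 0 else
  let max_deadline : Int := (PySem.List.pyRange 0 length 1).foldl
    (fun md idx => if PySem.List.pyGetD deadlines idx 0 > md then PySem.List.pyGetD deadlines idx 0 else md) 0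
  let slots : List Int := (PySem.List.pyRange 0 max_deadline 1).foldl (fun s _ => s ++ [(-1 : Int)]) []
  let order : List Int := sort_jobs_by_profit_desc profits deadlines
  let r : List Int × Int := (PySem.List.pyRange 0 length 1).foldl
    (fun sc oi =>
      let job_idx : Int := PySem.List.pyGetD order oi 0
      pvFillSlot job_idx (PySem.List.pyGetD deadlines job_idx 0 - 1) sc.1 sc.2)
    (slots, 0)
  r.2

-- ===== PORT B =====
def count_scheduled_jobs_alt (profits : List Int) (deadlines : List Int) : Int :=
  (PySem.List.sorted (PySem.List.slice deadlines none (some (profits.length : Int))) (fun x => x) false).foldl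
    (fun count d => if count < d then count + 1 else count) 0

-- ===== PRECONDITION & SPEC =====
-- A reads deadlines[idx] for every idx < len(profits); Pre_ excludes exactly the inputs where that raises.
def Pre_count_scheduled_jobs (profits : List Int) (deadlines : List Int) : Prop :=
  profits.length ≤ deadlines.length
instance (profits : List Int) (deadlines : List Int) : Decidable (Pre_count_scheduled_jobs profits deadlines) := by
  unfold Pre_count_scheduled_jobs; infer_instance
def pvWitness_count_scheduled_jobs : List Int × List Int := ([4, 1, 3], [2, 1, 2])

def Spec_count_scheduled_jobs (profits : List Int) (deadlines : List Int) (out : Int) : Prop := out = count_scheduled_jobs_alt profits deadlines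
instance (profits : List Int) (deadlines : List Int) (out : Int) : Decidable (Spec_count_scheduled_jobs profits deadlines out) := by unfold Spec_count_scheduled_jobs; infer_instance

-- ===== CLAIM (what is proved, stated in full; the proofs are below) =====
def Claim_equal_count_scheduled_jobs : Prop := ∀ (profits : List Int) (deadlines : List Int), Dom_count_scheduled_jobs profits deadlines → Pre_count_scheduled_jobs profits deadlines → Spec_count_scheduled_jobs profits deadlines (count_scheduled_jobs profits deadlines)

-- ===== LEMMAS AND PROOFS =====

-- ## The abstract greedy on an occupancy vector (true = slot filled; getD defaults to true,
-- ## so out-of-range slots count as filled and free slots are automatically in range)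

/-- Highest index `s < k` with `o.getD s true = false`. -/
def pvScanN (o : List Bool) : Nat → Option Nat
  | 0 => none
  | k + 1 => if o.getD k true = false then some k else pvScanN o k

/-- Highest free slot strictly below the deadline `d`. -/
def pvTopFree (o : List Bool) (d : Int) : Option Nat := pvScanN o d.toNat

/-- One abstract greedy step: fill the highest free slot below `d`, if any. -/
def pvStep (o : List Bool) (d : Int) : List Bool :=
  match pvTopFree o d with
  | some s => o.set s true
  | none => o

/-- Occupancy abstraction of A's slot array. -/
def pvOcc (slots : List Int) : List Bool := slots.map (fun x => decide (x ≠ -1))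

lemma pvScanN_none_iff (o : List Bool) (k : Nat) :
    pvScanN o k = none ↔ ∀ s, s < k → o.getD s true = true := by
  induction k with
  | zero => simp [pvScanN]
  | succ k ih =>
    by_cases h : o.getD k true = false
    · simp only [pvScanN, if_pos h]
      constructor
      · intro hc; cases hc
      · intro hall
        have h2 := hall k (Nat.lt_succ_self k)
        rw [h2] at h; cases h
    · have h' : o.getD k true = true := by simpa using h
      simp only [pvScanN, if_neg h]
      rw [ih]
      constructor
      · intro hall s hs
        rcases Nat.lt_succ_iff_lt_or_eq.1 hs with h2 | rfl
        · exact hall s h2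
        · exact h'
      · intro hall s hs; exact hall s (Nat.lt_succ_of_lt hs)

lemma pvScanN_some_iff (o : List Bool) (k s : Nat) :
    pvScanN o k = some s ↔
      s < k ∧ o.getD s true = false ∧ ∀ t, s < t → t < k → o.getD t true = true := by
  induction k with
  | zero => simp [pvScanN]
  | succ k ih =>
    by_cases h : o.getD k true = false
    · simp only [pvScanN, if_pos h, Option.some.injEq]
      constructor
      · rintro rfl
        exact ⟨Nat.lt_succ_self _, h, fun t ht1 ht2 => absurd ht2 (by omega)⟩
      · rintro ⟨hsk, hsf, hmax⟩
        by_contra hne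
        have hsk' : s < k := by omega
        have h2 := hmax k hsk' (Nat.lt_succ_self k)
        rw [h2] at h; cases h
    · have h' : o.getD k true = true := by simpa using h
      simp only [pvScanN, if_neg h]
      rw [ih]
      constructor
      · rintro ⟨h1, h2, h3⟩
        refine ⟨by omega, h2, fun t ht1 ht2 => ?_⟩
        rcases Nat.lt_succ_iff_lt_or_eq.1 ht2 with h4 | rfl
        · exact h3 t ht1 h4
        · exact h'
      · rintro ⟨h1, h2, h3⟩
        have hsk : s ≠ k := fun e => by rw [e, h'] at h2; cases h2
        exact ⟨by omega, h2, fun t ht1 ht2 => h3 t ht1 (by omega)⟩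

lemma pv_free_lt_length (o : List Bool) (s : Nat) (h : o.getD s true = false) : s < o.length := by
  by_contra hn
  rw [List.getD_eq_default _ _ (by omega)] at h
  cases h

lemma pv_getD_set (o : List Bool) (s t : Nat) (b dflt : Bool) :
    (o.set s b).getD t dflt = if s = t ∧ s < o.length then b else o.getD t dflt := by
  induction o generalizing s t with
  | nil => simp
  | cons a l ih =>
    cases s with
    | zero => cases t <;> simp
    | succ s =>
      cases t with
      | zero => simp [List.getD_cons_zero]
      | succ t =>
        simp only [List.set_cons_succ, List.getD_cons_succ, ih, List.length_cons]
        split_ifs with hA hB hB <;> first | rfl | omega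

lemma pv_countP_set_true (o : List Bool) (s : Nat) (hf : o.getD s true = false) :
    (o.set s true).countP id = o.countP id + 1 := by
  induction o generalizing s with
  | nil => exact absurd (pv_free_lt_length [] s hf) (by simp)
  | cons a l ih =>
    cases s with
    | zero =>
      rw [List.getD_cons_zero] at hf
      subst hf
      simp
    | succ s =>
      rw [List.getD_cons_succ] at hf
      simp only [List.set_cons_succ, List.countP_cons, ih s hf]
      omega

lemma pv_set_true_scan_none (o : List Bool) (t : Nat) (k : Nat)
    (h : pvScanN o k = none) : pvScanN (o.set t true) k = none := by
  rw [pvScanN_none_iff] at h ⊢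
  intro s hs
  rw [pv_getD_set]
  split_ifs with h1
  · rfl
  · exact h s hs

/-- Scanning below `k` equals scanning below `j` when every slot in `[j, k)` is filled. -/
lemma pvScanN_drop_top (o : List Bool) (j k : Nat) (hjk : j ≤ k)
    (h : ∀ t, j ≤ t → t < k → o.getD t true = true) : pvScanN o k = pvScanN o j := by
  induction k with
  | zero => obtain rfl := Nat.le_zero.1 hjk; rfl
  | succ k ih =>
    rcases Nat.eq_or_lt_of_le hjk with he | hlt
    · rw [he]
    · have hk : o.getD k true = true := h k (by omega) (Nat.lt_succ_self k)
      simp only [pvScanN, hk]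
      exact ih (by omega) (fun t ht1 ht2 => h t ht1 (by omega))

/-- Filling one slot commutes with filling another: the abstract step is right-commutative. -/
lemma pvStep_comm (o : List Bool) (d₁ d₂ : Int) :
    pvStep (pvStep o d₁) d₂ = pvStep (pvStep o d₂) d₁ := by
  have key : ∀ (e₁ e₂ : Int) (s₁ s₂ : Nat),
      pvTopFree o e₁ = some s₁ → pvTopFree o e₂ = some s₂ → ¬ s₂ < e₁.toNat →
      pvStep (pvStep o e₁) e₂ = pvStep (pvStep o e₂) e₁ := by
    intro e₁ e₂ s₁ s₂ h1 h2 hc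
    obtain ⟨hs1k, hs1f, hs1m⟩ := (pvScanN_some_iff o _ _).1 h1
    obtain ⟨hs2k, hs2f, hs2m⟩ := (pvScanN_some_iff o _ _).1 h2
    have hne : s₁ ≠ s₂ := by omega
    have hL : pvTopFree (o.set s₁ true) e₂ = some s₂ := by
      rw [pvTopFree, pvScanN_some_iff]
      refine ⟨hs2k, ?_, fun t ht1 ht2 => ?_⟩
      · rw [pv_getD_set, if_neg (by rintro ⟨e, _⟩; exact hne e)]; exact hs2f
      · rw [pv_getD_set, if_neg (by rintro ⟨e, _⟩; omega)]; exact hs2m t ht1 ht2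
    have hR : pvTopFree (o.set s₂ true) e₁ = some s₁ := by
      rw [pvTopFree, pvScanN_some_iff]
      refine ⟨hs1k, ?_, fun t ht1 ht2 => ?_⟩
      · rw [pv_getD_set, if_neg (by rintro ⟨e, _⟩; exact hne e.symm)]; exact hs1f
      · rw [pv_getD_set, if_neg (by rintro ⟨e, _⟩; omega)]; exact hs1m t ht1 ht2
    have eA : pvStep o e₁ = o.set s₁ true := by simp only [pvStep, h1]
    have eB : pvStep o e₂ = o.set s₂ true := by simp only [pvStep, h2]
    rw [eA, eB]
    simp only [pvStep, hL, hR]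
    exact List.set_comm true true hne
  cases h1 : pvTopFree o d₁ with
  | none =>
    cases h2 : pvTopFree o d₂ with
    | none => simp only [pvStep, h1, h2]
    | some s₂ =>
      have h1' : pvTopFree (o.set s₂ true) d₁ = none := pv_set_true_scan_none o s₂ _ h1
      simp only [pvStep, h1, h2, h1']
  | some s₁ =>
    cases h2 : pvTopFree o d₂ with
    | none =>
      have h2' : pvTopFree (o.set s₁ true) d₂ = none := pv_set_true_scan_none o s₁ _ h2
      simp only [pvStep, h1, h2, h2']
    | some s₂ =>
      obtain ⟨hk1, hf1, hm1⟩ := (pvScanN_some_iff o _ _).1 h1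
      obtain ⟨hk2, hf2, hm2⟩ := (pvScanN_some_iff o _ _).1 h2
      by_cases hss : s₁ = s₂
      · subst hss
        have hlen : s₁ < o.length := pv_free_lt_length o s₁ hf1
        have hfill : ∀ (k : Nat), s₁ < k → (∀ t, s₁ < t → t < k → o.getD t true = true) →
            pvScanN (o.set s₁ true) k = pvScanN (o.set s₁ true) s₁ := by
          intro k hk hm
          refine pvScanN_drop_top _ s₁ k (by omega) (fun t ht1 ht2 => ?_)
          rw [pv_getD_set]
          rcases Nat.eq_or_lt_of_le ht1 with he | hlt
          · rw [if_pos ⟨he, hlen⟩]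
          · rw [if_neg (by rintro ⟨e, _⟩; omega)]; exact hm t hlt ht2
        have e1 : pvScanN (o.set s₁ true) d₁.toNat = pvScanN (o.set s₁ true) s₁ :=
          hfill _ hk1 hm1
        have e2 : pvScanN (o.set s₁ true) d₂.toNat = pvScanN (o.set s₁ true) s₁ :=
          hfill _ hk2 hm2
        have eA : pvStep o d₁ = o.set s₁ true := by simp only [pvStep, h1]
        have eB : pvStep o d₂ = o.set s₁ true := by simp only [pvStep, h2]
        rw [eA, eB]
        simp only [pvStep, pvTopFree, e1, e2]
      · have hdisj : ¬ s₂ < d₁.toNat ∨ ¬ s₁ < d₂.toNat := by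
          by_contra hcc
          obtain ⟨c1, c2⟩ : s₂ < d₁.toNat ∧ s₁ < d₂.toNat := by tauto
          rcases Nat.lt_or_ge s₁ s₂ with hlt | hge
          · have h3 := hm1 s₂ hlt c1; rw [h3] at hf2; cases hf2
          · have h3 := hm2 s₁ (by omega) c2; rw [h3] at hf1; cases hf1
        rcases hdisj with hc | hc
        · exact key d₁ d₂ s₁ s₂ h1 h2 hc
        · exact (key d₂ d₁ s₂ s₁ h2 h1 hc).symm

lemma pv_occ_getD (slots : List Int) (s : Nat) :
    (pvOcc slots).getD s true = decide (slots.getD s 0 ≠ -1) := by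
  induction slots generalizing s with
  | nil => simp [pvOcc]
  | cons a l ih =>
    cases s with
    | zero => simp [pvOcc]
    | succ s => simpa [pvOcc] using ih s

/-- A's inner while-loop computes the abstract "fill highest free slot ≤ slot" step. -/
lemma pvFillSlot_sim (job_idx : Int) :
    ∀ (slot : Int) (slots : List Int) (count : Int),
      pvFillSlot job_idx slot slots count =
        ((match pvScanN (pvOcc slots) (slot + 1).toNat with
          | some s => slots.set s job_idx
          | none => slots),
         (match pvScanN (pvOcc slots) (slot + 1).toNat with
          | some _ => count + 1
          | none => count)) := by
  have key : ∀ (n : Nat) (slot : Int), (slot + 1).toNat = n → ∀ (slots : List Int) (count : Int),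
      pvFillSlot job_idx slot slots count =
        ((match pvScanN (pvOcc slots) (slot + 1).toNat with
          | some s => slots.set s job_idx
          | none => slots),
         (match pvScanN (pvOcc slots) (slot + 1).toNat with
          | some _ => count + 1
          | none => count)) := by
    intro n
    induction n with
    | zero =>
      intro slot hn slots count
      have hneg : ¬ 0 ≤ slot := by omega
      rw [pvFillSlot, dif_neg hneg, hn]
      simp [pvScanN]
    | succ k ih =>
      intro slot hn slots count
      have hpos : 0 ≤ slot := by omega
      have htn : slot.toNat = k := by omega
      have hget : PySem.List.pyGetD slots slot 0 = slots.getD k 0 := by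
        rw [PySem.List.pyGetD_of_nonneg slots 0 hpos, htn]
      rw [pvFillSlot, dif_pos hpos, hn]
      by_cases hfree : slots.getD k 0 = -1
      · have hbeq : (PySem.List.pyGetD slots slot 0 == -1) = true := by
          rw [hget, hfree]; rfl
        rw [if_pos hbeq]
        have hocc : (pvOcc slots).getD k true = false := by
          rw [pv_occ_getD, hfree]; simp
        have hscan : pvScanN (pvOcc slots) (k + 1) = some k := by
          show (if (pvOcc slots).getD k true = false then some k
                else pvScanN (pvOcc slots) k) = some k
          rw [hocc]
          simp
        rw [hscan, PySem.List.pySetD_of_nonneg slots job_idx hpos, htn]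
      · have hbeq : ¬ (PySem.List.pyGetD slots slot 0 == -1) = true := by
          rw [hget]; simpa using hfree
        rw [if_neg hbeq]
        have hocc : (pvOcc slots).getD k true = true := by
          rw [pv_occ_getD]; simpa using hfree
        have hrec := ih (slot - 1) (by omega) slots count
        have hsh : (slot - 1 + 1).toNat = k := by omega
        rw [hsh] at hrec
        simp only [pvScanN, hocc]
        simpa using hrec
  intro slot slots count
  exact key _ slot rfl slots count

/-- Per-job deadline lookup used by A's outer loop. -/
def pvDStep (deadlines : List Int) (o : List Bool) (j : Int) : List Bool :=
  pvStep o (PySem.List.pyGetD deadlines j 0)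

lemma pv_countP_pvStep (o : List Bool) (d : Int) :
    ((pvStep o d).countP id : Int) =
      (o.countP id : Int) + (if (pvTopFree o d).isSome then 1 else 0) := by
  cases h : pvTopFree o d with
  | none => simp [pvStep, h]
  | some s =>
    obtain ⟨-, hf, -⟩ := (pvScanN_some_iff o _ _).1 h
    simp [pvStep, h, pv_countP_set_true o s hf]

/-- A's outer loop simulated by the abstract fold; the count is the gain in filled slots. -/
lemma pv_loop_sim (deadlines : List Int) :
    ∀ (js : List Int), (∀ j ∈ js, j ≠ -1) → ∀ (sc : List Int × Int),
      pvOcc ((js.foldl (fun sc j =>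
          pvFillSlot j (PySem.List.pyGetD deadlines j 0 - 1) sc.1 sc.2) sc).1) =
        js.foldl (pvDStep deadlines) (pvOcc sc.1) ∧
      (js.foldl (fun sc j =>
          pvFillSlot j (PySem.List.pyGetD deadlines j 0 - 1) sc.1 sc.2) sc).2 =
        sc.2 + ((js.foldl (pvDStep deadlines) (pvOcc sc.1)).countP id : Int)
             - ((pvOcc sc.1).countP id : Int) := by
  intro js
  induction js with
  | nil => intro _ sc; simp
  | cons j js ih =>
    intro hjs sc
    have hj : j ≠ -1 := hjs j List.mem_cons_self
    have hsim := pvFillSlot_sim j (PySem.List.pyGetD deadlines j 0 - 1) sc.1 sc.2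
    have hsub : PySem.List.pyGetD deadlines j 0 - 1 + 1 = PySem.List.pyGetD deadlines j 0 := by ring
    rw [hsub] at hsim
    have hstep1 : pvOcc ((pvFillSlot j (PySem.List.pyGetD deadlines j 0 - 1) sc.1 sc.2).1) =
        pvDStep deadlines (pvOcc sc.1) j := by
      rw [hsim]
      cases hscan : pvScanN (pvOcc sc.1) (PySem.List.pyGetD deadlines j 0).toNat with
      | none => simp only [pvDStep, pvStep, pvTopFree, hscan]
      | some s =>
        simp only [pvDStep, pvStep, pvTopFree, hscan]
        unfold pvOcc
        rw [List.map_set]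
        congr 1
        simp [hj]
    have hstep2 : (pvFillSlot j (PySem.List.pyGetD deadlines j 0 - 1) sc.1 sc.2).2 =
        sc.2 + ((pvDStep deadlines (pvOcc sc.1) j).countP id : Int)
             - ((pvOcc sc.1).countP id : Int) := by
      rw [hsim]
      have := pv_countP_pvStep (pvOcc sc.1) (PySem.List.pyGetD deadlines j 0)
      cases hscan : pvScanN (pvOcc sc.1) (PySem.List.pyGetD deadlines j 0).toNat with
      | none =>
        rw [pvDStep]
        simp only [pvStep, pvTopFree, hscan]
        ring
      | some s =>
        obtain ⟨-, hf, -⟩ := (pvScanN_some_iff (pvOcc sc.1) _ _).1 hscan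
        rw [pvDStep]
        simp only [pvStep, pvTopFree, hscan, pv_countP_set_true (pvOcc sc.1) s hf]
        push_cast
        ring
    obtain ⟨ih1, ih2⟩ := ih (fun x hx => hjs x (List.mem_cons_of_mem _ hx))
      (pvFillSlot j (PySem.List.pyGetD deadlines j 0 - 1) sc.1 sc.2)
    simp only [List.foldl_cons]
    refine ⟨?_, ?_⟩
    · rw [ih1, hstep1]
    · rw [ih2, hstep1, hstep2]
      ring

-- ## Permutation facts about A's selection sort of indices

lemma pv_getD_cons_perm {α : Type} :
    ∀ (l : List α) (k : Nat) (x x0 : α), k < l.length →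
      (l.getD k x0 :: l.set k x).Perm (x :: l) := by
  intro l
  induction l with
  | nil => intro k x x0 h; simp at h
  | cons b u ih =>
    intro k x x0 h
    cases k with
    | zero =>
      simp only [List.getD_cons_zero, List.set_cons_zero]
      exact List.Perm.swap x b u
    | succ k =>
      simp only [List.getD_cons_succ, List.set_cons_succ]
      exact (List.Perm.swap b _ _).trans
        (((ih k x x0 (by simpa using h)).cons b).trans (List.Perm.swap x b u))

lemma pv_swap_perm {α : Type} (x0 : α) :
    ∀ (l : List α) (i j : Nat), i < j → j < l.length →
      ((l.set i (l.getD j x0)).set j (l.getD i x0)).Perm l := by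
  intro l
  induction l with
  | nil => intro i j h1 h2; simp at h2
  | cons a u ih =>
    intro i j h1 h2
    cases i with
    | zero =>
      cases j with
      | zero => omega
      | succ j =>
        simp only [List.getD_cons_zero, List.getD_cons_succ, List.set_cons_zero,
          List.set_cons_succ]
        exact pv_getD_cons_perm u j a x0 (by simpa using h2)
    | succ i =>
      cases j with
      | zero => omega
      | succ j =>
        simp only [List.getD_cons_succ, List.set_cons_succ]
        exact (ih i j (by omega) (by simpa using h2)).cons a

lemma pv_foldl_pres {α β : Type} (P : β → Prop) (f : β → α → β) :
    ∀ (l : List α) (b : β), P b → (∀ b' a, a ∈ l → P b' → P (f b' a)) → P (l.foldl f b) := by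
  intro l
  induction l with
  | nil => intro b hb _; exact hb
  | cons a t ih =>
    intro b hb hstep
    exact ih (f b a) (hstep b a List.mem_cons_self hb)
      (fun b' x hx hb' => hstep b' x (List.mem_cons_of_mem a hx) hb')

/-- A's selection sort only permutes the index list `range(len(profits))`. -/
lemma pv_order_perm (profits deadlines : List Int) :
    (sort_jobs_by_profit_desc profits deadlines).Perm
      (PySem.List.pyRange 0 (profits.length : Int) 1) := by
  have hind : (PySem.List.pyRange 0 (profits.length : Int) 1).foldl
      (fun ind idx => ind ++ [idx]) ([] : List Int) =
      PySem.List.pyRange 0 (profits.length : Int) 1 := by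
    have := PySem.List.foldl_append_singleton_eq_map (fun x : Int => x)
      (PySem.List.pyRange 0 (profits.length : Int) 1) []
    simpa using this
  simp only [sort_jobs_by_profit_desc, hind]
  refine pv_foldl_pres (fun ind : List Int => ind.Perm (PySem.List.pyRange 0 (profits.length : Int) 1))
    _ _ _ List.Perm.rfl ?_
  intro ind i hi hperm
  refine pv_foldl_pres (fun ind : List Int => ind.Perm (PySem.List.pyRange 0 (profits.length : Int) 1))
    _ _ _ hperm ?_
  intro ind' j hj hperm'
  split_ifs with hcmp
  · have hi' := PySem.List.mem_pyRange_one.1 hi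
    have hj' := PySem.List.mem_pyRange_one.1 hj
    have hlen : ind'.length = profits.length := by
      have h := hperm'.length_eq
      rw [PySem.List.length_pyRange_one] at h
      omega
    have h0i : (0 : Int) ≤ i := hi'.1
    have h0j : (0 : Int) ≤ j := by omega
    rw [PySem.List.pyGetD_of_nonneg ind' (0 : Int) h0i,
        PySem.List.pyGetD_of_nonneg ind' (0 : Int) h0j,
        PySem.List.pySetD_of_nonneg ind' _ h0i,
        PySem.List.pySetD_of_nonneg _ _ h0j]
    refine (pv_swap_perm 0 ind' i.toNat j.toNat (by omega) (by omega)).trans hperm'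
  · exact hperm'

-- ## From index ranges to the deadline prefix

lemma pv_range_map_take (xs : List Int) (n : Nat) (h : n ≤ xs.length) :
    (PySem.List.pyRange 0 (n : Int) 1).map (fun j => PySem.List.pyGetD xs j 0) = xs.take n := by
  apply List.ext_getElem
  · simp [PySem.List.length_pyRange_one]
    omega
  · intro k h1 h2
    have hk : k < n := by
      simpa [PySem.List.length_pyRange_one] using h1
    have hkx : k < xs.length := by omega
    rw [List.getElem_map, PySem.List.getElem_pyRange_one]
    rw [show (0 : Int) + (k : Int) = ((k : Nat) : Int) by ring]
    rw [PySem.List.pyGetD_natCast, List.getD_eq_getElem?_getD, List.getElem?_eq_getElem hkx]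
    simp [List.getElem_take]

-- ## Counting filled slots

lemma pv_countP_split (o : List Bool) (k : Nat)
    (h : ∀ s, s < o.length → o.getD s true = true → s < k) :
    o.countP id = (o.take k).countP id := by
  conv_lhs => rw [← List.take_append_drop k o]
  rw [List.countP_append]
  have hz : (o.drop k).countP id = 0 := by
    rw [List.countP_eq_zero]
    intro b hb
    rcases List.mem_iff_getElem.1 hb with ⟨i, hi, rfl⟩
    have hlen : k + i < o.length := by
      have := hi; simp [List.length_drop] at this; omega
    intro hid
    have hgd : o.getD (k + i) true = true := by
      rw [List.getD_eq_getElem?_getD, List.getElem?_eq_getElem hlen]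
      simpa [List.getElem_drop] using hid
    have := h (k + i) hlen hgd
    omega
  omega

lemma pv_full_below (o : List Bool) (k : Nat) (hk : k ≤ o.length)
    (hc : k ≤ o.countP id)
    (h : ∀ s, s < o.length → o.getD s true = true → s < k) :
    ∀ s, s < k → o.getD s true = true := by
  have hsplit := pv_countP_split o k h
  have hlen : (o.take k).length = k := by
    rw [List.length_take]; omega
  have hfull : (o.take k).countP id = (o.take k).length := by
    have h1 : (o.take k).countP id ≤ (o.take k).length := List.countP_le_length
    omega
  have hall := List.countP_eq_length.1 hfull
  intro s hs
  have hsl : s < o.length := by omega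
  have hmem : o[s] ∈ o.take k := by
    refine List.mem_iff_getElem.2 ⟨s, by omega, ?_⟩
    exact List.getElem_take
  have := hall _ hmem
  rw [List.getD_eq_getElem?_getD, List.getElem?_eq_getElem hsl]
  simpa using this

lemma pv_countP_ge (o : List Bool) (k : Nat) (hk : k ≤ o.length)
    (h : ∀ s, s < k → o.getD s true = true) : k ≤ o.countP id := by
  have hall : ∀ b ∈ o.take k, id b = true := by
    intro b hb
    rcases List.mem_iff_getElem.1 hb with ⟨i, hi, rfl⟩
    have hik : i < k := by
      have := hi; rw [List.length_take] at this; omega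
    have hil : i < o.length := by omega
    have hgd := h i hik
    rw [List.getD_eq_getElem?_getD, List.getElem?_eq_getElem hil] at hgd
    simpa [List.getElem_take] using hgd
  have hfull := List.countP_eq_length.2 hall
  have hlen : (o.take k).length = k := by rw [List.length_take]; omega
  conv_rhs => rw [← List.take_append_drop k o]
  rw [List.countP_append]
  omega

-- ## The abstract greedy on sorted deadlines is the EDF counter

lemma pv_edf : ∀ (l : List Int) (o : List Bool),
    l.Pairwise (· ≤ ·) →
    (∀ d ∈ l, d ≤ (o.length : Int)) →
    (∀ d ∈ l, ∀ s, s < o.length → o.getD s true = true → (s : Int) < d) →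
    ((l.foldl pvStep o).countP id : Int) =
      l.foldl (fun c d => if c < d then c + 1 else c) ((o.countP id : Int)) := by
  intro l
  induction l with
  | nil => intro o _ _ _; simp
  | cons d rest ih =>
    intro o hpw hbd htr
    have hpw' := (List.pairwise_cons.1 hpw).2
    have hdle := (List.pairwise_cons.1 hpw).1
    have hbd_d : d ≤ (o.length : Int) := hbd d List.mem_cons_self
    have htr_d := htr d List.mem_cons_self
    simp only [List.foldl_cons]
    by_cases hacc : (o.countP id : Int) < d
    · have hd0 : 0 < d := by omega
      have hkl : d.toNat ≤ o.length := by omega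
      cases hscan : pvScanN o d.toNat with
      | none =>
        exfalso
        have hfull := (pvScanN_none_iff o d.toNat).1 hscan
        have := pv_countP_ge o d.toNat hkl hfull
        omega
      | some s =>
        obtain ⟨hsk, hsf, -⟩ := (pvScanN_some_iff o _ _).1 hscan
        have hslen : s < o.length := pv_free_lt_length o s hsf
        have hstep : pvStep o d = o.set s true := by
          simp only [pvStep, pvTopFree, hscan]
        rw [hstep, if_pos hacc]
        have hcount : (o.set s true).countP id = o.countP id + 1 :=
          pv_countP_set_true o s hsf
        have hIH := ih (o.set s true) hpw'
          (fun d' hd' => by rw [List.length_set]; exact hbd d' (List.mem_cons_of_mem _ hd'))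
          (fun d' hd' s' hs' hts' => by
            rw [List.length_set] at hs'
            rw [pv_getD_set] at hts'
            by_cases he : s = s' ∧ s < o.length
            · obtain ⟨rfl, -⟩ := he
              have hsd : (s : Int) < d := by omega
              exact lt_of_lt_of_le hsd (hdle d' hd')
            · rw [if_neg he] at hts'
              exact htr d' (List.mem_cons_of_mem _ hd') s' hs' hts')
        rw [hIH, hcount]
        have : ((o.countP id + 1 : Nat) : Int) = (o.countP id : Int) + 1 := by push_cast; ring
        rw [this]
    · have hstep : pvStep o d = o := by
        by_cases hd0 : d ≤ 0
        · have hz : d.toNat = 0 := by omega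
          simp only [pvStep, pvTopFree, hz, pvScanN]
        · have hkl : d.toNat ≤ o.length := by omega
          have hcge : d.toNat ≤ o.countP id := by omega
          have htrk : ∀ s, s < o.length → o.getD s true = true → s < d.toNat := by
            intro s hs ht
            have := htr_d s hs ht
            omega
          have hfull := pv_full_below o d.toNat hkl hcge htrk
          have hnone : pvScanN o d.toNat = none := (pvScanN_none_iff o _).2 hfull
          simp only [pvStep, pvTopFree, hnone]
      rw [hstep, if_neg hacc]
      exact ih o hpw' (fun d' hd' => hbd d' (List.mem_cons_of_mem _ hd'))
        (fun d' hd' => htr d' (List.mem_cons_of_mem _ hd'))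

-- ===== VERDICT (by name: the statement is the Claim_ definition above) =====
theorem count_scheduled_jobs_spec : Claim_equal_count_scheduled_jobs := by
  intro profits deadlines _dom hpre
  unfold Pre_count_scheduled_jobs at hpre
  unfold Spec_count_scheduled_jobs
  by_cases hnil : profits.length = 0
  · have hA : count_scheduled_jobs profits deadlines = 0 := by
      simp [count_scheduled_jobs, hnil]
    have hB0 : count_scheduled_jobs_alt profits deadlines = 0 := by
      unfold count_scheduled_jobs_alt
      rw [hnil, PySem.List.slice_to_natCast deadlines 0, List.take_zero,
        (PySem.List.sorted_eq_nil_iff ([] : List Int) (fun x => x) false).2 rfl]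
      rfl
    rw [hA, hB0]
  · have hB : count_scheduled_jobs_alt profits deadlines =
        (PySem.List.sorted (deadlines.take profits.length) (fun x => x) false).foldl
          (fun c d => if c < d then c + 1 else c) 0 := by
      unfold count_scheduled_jobs_alt
      rw [PySem.List.slice_to_natCast]
    rw [hB]
    simp only [count_scheduled_jobs]
    rw [if_neg (by simpa using hnil)]
    -- names for the pieces of A
    set N : Int := (profits.length : Int) with hN
    set ds : List Int := deadlines.take profits.length with hds
    set md : Int := (PySem.List.pyRange 0 N 1).foldl
      (fun md idx => if PySem.List.pyGetD deadlines idx 0 > md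
                     then PySem.List.pyGetD deadlines idx 0 else md) 0 with hmd
    set slots0 : List Int := (PySem.List.pyRange 0 md 1).foldl
      (fun s _ => s ++ [(-1 : Int)]) [] with hslots
    set order : List Int := sort_jobs_by_profit_desc profits deadlines with horder
    have hmapds : (PySem.List.pyRange 0 N 1).map (fun j => PySem.List.pyGetD deadlines j 0) = ds :=
      pv_range_map_take deadlines profits.length hpre
    -- max_deadline is the running max of ds
    have hmd_eq : md = ds.foldl (fun acc y => max acc ((fun x : Int => x) y)) 0 := by
      rw [hmd, ← hmapds, List.foldl_map]
      have hbody : (fun (a idx : Int) =>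
          if PySem.List.pyGetD deadlines idx 0 > a then PySem.List.pyGetD deadlines idx 0 else a) =
          (fun (x idx : Int) => max x ((fun x : Int => x) (PySem.List.pyGetD deadlines idx 0))) := by
        funext a idx
        by_cases h : PySem.List.pyGetD deadlines idx 0 > a
        · rw [if_pos h]
          exact (max_eq_right (show a ≤ (fun x : Int => x) (PySem.List.pyGetD deadlines idx 0)
            from h.le)).symm
        · rw [if_neg h]
          exact (max_eq_left (show (fun x : Int => x) (PySem.List.pyGetD deadlines idx 0) ≤ a
            from not_lt.mp h)).symm
      rw [hbody]
    have hmd0 : 0 ≤ md := by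
      rw [hmd_eq]; exact (PySem.List.le_foldl_max_int ds (fun x => x) 0).1
    have hmdub : ∀ x ∈ ds, x ≤ md := by
      rw [hmd_eq]; exact (PySem.List.le_foldl_max_int ds (fun x => x) 0).2
    -- the slot array is replicate
    have hslots_eq : slots0 = List.replicate md.toNat (-1 : Int) := by
      rw [hslots]
      rw [show (fun (s : List Int) (_ : Int) => s ++ [(-1 : Int)]) =
          (fun (s : List Int) (x : Int) => s ++ [(fun _ : Int => (-1 : Int)) x]) from rfl]
      rw [PySem.List.foldl_append_singleton_eq_map]
      simp [List.map_const', PySem.List.length_pyRange_one]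
    have hocc0 : pvOcc slots0 = List.replicate md.toNat false := by
      rw [hslots_eq]; simp [pvOcc]
    have hlen0 : (pvOcc slots0).length = md.toNat := by rw [hocc0]; simp
    have hcount0 : (pvOcc slots0).countP id = 0 := by
      rw [hocc0]; simp [List.countP_replicate]
    -- the order is a permutation of range(n)
    have hperm : order.Perm (PySem.List.pyRange 0 N 1) := pv_order_perm profits deadlines
    have horderlen : order.length = profits.length := by
      have h := hperm.length_eq
      rw [PySem.List.length_pyRange_one] at h
      omega
    have hordermem : ∀ j ∈ order, 0 ≤ j ∧ j < N := by
      intro j hj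
      exact PySem.List.mem_pyRange_one.1 (hperm.mem_iff.1 hj)
    -- rewrite the outer loop as a fold over `order`
    have hmaporder : (PySem.List.pyRange 0 N 1).map (fun j => PySem.List.pyGetD order j 0) = order := by
      rw [show N = (order.length : Int) by rw [horderlen]]
      exact PySem.List.map_pyGetD_pyRange_zero' order 0
    have hloop : (PySem.List.pyRange 0 N 1).foldl
        (fun sc oi => pvFillSlot (PySem.List.pyGetD order oi 0)
          (PySem.List.pyGetD deadlines (PySem.List.pyGetD order oi 0) 0 - 1) sc.1 sc.2)
        (slots0, (0 : Int)) =
        order.foldl (fun sc j => pvFillSlot j (PySem.List.pyGetD deadlines j 0 - 1) sc.1 sc.2)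
        (slots0, (0 : Int)) := by
      conv_rhs => rw [← hmaporder]
      rw [List.foldl_map]
    rw [hloop]
    -- simulate by the abstract greedy
    obtain ⟨-, hcnt⟩ := pv_loop_sim deadlines order
      (fun j hj => by have := (hordermem j hj).1; omega) (slots0, 0)
    dsimp only at hcnt
    rw [hcnt]
    -- fold over order = fold over sorted ds
    have habs : order.foldl (pvDStep deadlines) (pvOcc slots0) =
        (order.map (fun j => PySem.List.pyGetD deadlines j 0)).foldl pvStep (pvOcc slots0) := by
      rw [List.foldl_map]; rfl
    have hpermL : (order.map (fun j => PySem.List.pyGetD deadlines j 0)).Perm ds := by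
      have h1 := hperm.map (fun j => PySem.List.pyGetD deadlines j 0)
      rwa [hmapds] at h1
    have hsortperm : (PySem.List.sorted ds (fun x => x) false).Perm ds :=
      PySem.List.sorted_perm ds (fun x => x) false
    have hfold_eq : (order.map (fun j => PySem.List.pyGetD deadlines j 0)).foldl
          pvStep (pvOcc slots0) =
        (PySem.List.sorted ds (fun x => x) false).foldl pvStep (pvOcc slots0) :=
      (hpermL.trans hsortperm.symm).foldl_eq'
        (fun x _ y _ z => pvStep_comm z x y) (pvOcc slots0)
    rw [habs, hfold_eq]
    -- evaluate the abstract greedy on the sorted list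
    have hsorted_pw : (PySem.List.sorted ds (fun x => x) false).Pairwise (· ≤ ·) := by
      have := PySem.List.sorted_pairwise ds (fun x => x)
      simpa using this
    have hedf := pv_edf (PySem.List.sorted ds (fun x => x) false) (pvOcc slots0) hsorted_pw
      (fun d hd => by
        rw [hlen0]
        have hd' : d ∈ ds := (PySem.List.mem_sorted ds (fun x => x) false d).1 hd
        have := hmdub d hd'
        omega)
      (fun d hd s hs ht => by
        exfalso
        rw [hocc0] at ht
        have hsm : s < md.toNat := by rwa [hlen0] at hs
        rw [List.getD_eq_getElem?_getD, List.getElem?_replicate, if_pos hsm] at ht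
        simp at ht)
    rw [hcount0] at hedf
    rw [hedf, hcount0]
    norm_num
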